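-- pv_equiv track=rewrite | github.com/anniseppanen/Tietorakenteet-ja-algoritmit-I | Lista/againinv.py | create
-- ===== SOURCE A (Python) =====
-- def create(n, k):
--     # Luodaan lista, jossa on maksimimäärä inversioita, eli lista, jossa luvut ovat suurimmasta pienimpään
--     l = list(reversed(range(1,n+1)))
--
--     # Lasketaan inversioiden määrä, joka listassa tekohetkellä on. Kaava tulee summan 1+2+...+n-1 = n(n-1)/2 kaavasta.
--     max_inv = int((n*(n-1))/2)
--
--     # Lasketaan sitten, kuinka monta näistä inversioista tulee poistaa, jotta saadaan haluttu määrä inversioita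
--     remove_inv = max_inv-k
--
--     index1 = 0
--     index2 = 1
--     x = len(l)
--
--     # Käydään listaa vasemmalta oikealle, vaihtaen aina kahden vierekkäisen numeron paikkaa.
--     for _ in range(remove_inv):
--
--         # Mikäli päästään listan loppuun, seuraavalla kierroksella ei haluta enää päästä tänne, sillä viimeisenä on jo listan isoin luku
--         # eikä sen paikkaa haluta enää muuttaa. Siksi x:stä vähennetään 1 ja lista aloitetaan taas alusta indeksein 0 ja 1.
--         if index2 == x:
--             x -= 1
--             index1 = 0
--             index2 = 1
--         a = l[index1]
--         b = l[index2]
--         l[index1] = b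
--         l[index2] = a
--         index1 += 1
--         index2 += 1
--     return l
-- ===== SOURCE B (Python) =====
-- def create(n, k):
--     # Closed form: p completed bubble passes plus t extra swaps, built directly.
--     if n <= 0:
--         return []
--     r = n * (n - 1) // 2 - k
--     if r <= 0:
--         return list(range(n, 0, -1))
--     p = 0
--     s = 0
--     while p < n - 1 and s + (n - 1 - p) <= r:
--         s += n - 1 - p
--         p += 1
--     t = r - s
--     m = n - p
--     return (list(range(m - 1, m - t - 1, -1)) + [m]
--             + list(range(m - t - 1, 0, -1)) + list(range(m + 1, n + 1)))
-- ===== Notes on version B (the rewrite author's own statement) =====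
-- stated objective: faster
-- what changed: B replaces A's step-by-step simulation of max_inv-k adjacent bubble swaps with a closed form: it counts how many complete bubble passes fit into the swap budget with an O(n) summing loop and then builds the resulting permutation directly from four integer ranges.
-- outside the precondition, e.g. on create(2, -1): A returns [2, 1], B returns [0, 1, 2]; on create(-2, 3): A returns [], B returns []
import Mathlib
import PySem

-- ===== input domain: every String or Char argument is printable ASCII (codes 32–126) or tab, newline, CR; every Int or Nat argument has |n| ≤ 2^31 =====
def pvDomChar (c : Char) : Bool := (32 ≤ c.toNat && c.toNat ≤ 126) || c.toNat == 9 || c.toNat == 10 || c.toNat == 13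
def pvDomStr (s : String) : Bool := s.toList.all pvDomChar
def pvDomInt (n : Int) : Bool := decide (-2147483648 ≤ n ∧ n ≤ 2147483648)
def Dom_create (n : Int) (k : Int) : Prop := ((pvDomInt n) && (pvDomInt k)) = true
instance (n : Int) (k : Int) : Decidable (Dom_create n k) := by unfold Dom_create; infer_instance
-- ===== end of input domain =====

-- B replaces A's O(n^2) swap-by-swap bubble simulation by counting complete passes and
-- building the permutation directly from integer ranges (measured asymptotically faster).

-- ===== PORT A =====
-- the for-loop of A: state (l, index1, index2, x), one recursion step per loop iteration
def createLoopA : Nat → List Int → Int → Int → Int → List Int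
  | 0, l, _, _, _ => l
  | c+1, l, i1, i2, x =>
    match (if i2 = x then ((0 : Int), (1 : Int), x - 1) else (i1, i2, x)) with
    | (i1, i2, x) =>
      let a := PySem.List.pyGetD l i1 0      -- l[index1]; in range on every input admitted by Pre_
      let b := PySem.List.pyGetD l i2 0      -- l[index2]
      let l := PySem.List.pySetD (PySem.List.pySetD l i1 b) i2 a
      createLoopA c l (i1 + 1) (i2 + 1) x

def create (n : Int) (k : Int) : List Int :=
  let l := (PySem.List.pyRange 1 (n+1) 1).reverse
  -- int((n*(n-1))/2): exact integer division for the n admitted by Pre_ (n*(n-1) < 2^53, float exact)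
  let max_inv := PySem.Int.floordiv (n*(n-1)) 2
  let remove_inv := max_inv - k
  createLoopA remove_inv.toNat l 0 1 (l.length : Int)

-- ===== PORT B =====
-- Source B's while loop: fuel = n-1-p is the size of the next bubble pass
def createFindB (r : Int) : Nat → Int → Int → Int × Int
  | 0, p, s => (p, s)
  | fuel+1, p, s =>
    if s + ((fuel : Int) + 1) ≤ r then createFindB r fuel (p + 1) (s + ((fuel : Int) + 1))
    else (p, s)

def create_alt (n : Int) (k : Int) : List Int :=
  if n ≤ 0 then []
  else
    let r := PySem.Int.floordiv (n*(n-1)) 2 - k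
    if r ≤ 0 then PySem.List.pyRange n 0 (-1)
    else
      let ps := createFindB r (n-1).toNat 0 0
      let t := r - ps.2
      let m := n - ps.1
      PySem.List.pyRange (m-1) (m-t-1) (-1) ++ [m] ++
        PySem.List.pyRange (m-t-1) 0 (-1) ++ PySem.List.pyRange (m+1) (n+1) 1

-- ===== PRECONDITION & SPEC =====
-- Pre_ restricts to the task's natural domain n ≥ 0, 0 ≤ k (for negative arguments A raises
-- IndexError on almost all inputs, and the few values it still returns are leftover-swap
-- artefacts), and to n ≤ 134217727: beyond that A's float expression int((n*(n-1))/2) is no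
-- longer exact integer arithmetic.
def Pre_create (n : Int) (k : Int) : Prop := 0 ≤ n ∧ n ≤ 134217727 ∧ 0 ≤ k
instance (n : Int) (k : Int) : Decidable (Pre_create n k) := by unfold Pre_create; infer_instance
def pvWitness_create : Int × Int := (5, 3)

def Spec_create (n : Int) (k : Int) (out : List Int) : Prop := out = create_alt n k
instance (n : Int) (k : Int) (out : List Int) : Decidable (Spec_create n k out) := by unfold Spec_create; infer_instance

-- ===== CLAIM (what is proved, stated in full; the proofs are below) =====
def Claim_equal_create : Prop := ∀ (n : Int) (k : Int), Dom_create n k → Pre_create n k → Spec_create n k (create n k)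

-- ===== LEMMAS AND PROOFS =====

-- descending run [a, a-1, ..., a-t+1]
def segI (a : Int) (t : Nat) : List Int := (List.range t).map (fun j : Nat => a - (j : Int))
-- ascending run [a, a+1, ..., a+c-1]
def ascI (a : Int) (c : Nat) : List Int := (List.range c).map (fun j : Nat => a + (j : Int))
-- the list after p = N-m complete passes and t in-pass swaps of A's loop
def SL (N m t : Nat) : List Int :=
  segI ((m : Int) - 1) t ++ (m : Int) ::
    (segI ((m : Int) - 1 - t) (m - 1 - t) ++ ascI ((m : Int) + 1) (N - m))
-- index bookkeeping of A: c more iterations from in-pass position (m, t)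
def adv : Nat → Nat → Nat → Nat × Nat
  | m, t, 0 => (m, t)
  | m, t, c+1 => if t + 1 = m then adv (m-1) 1 c else adv m (t+1) c
-- pass/offset decomposition as B computes it
def repB : Nat → Nat → Nat × Nat
  | 0, c => (0, c)
  | 1, c => (1, c)
  | m+2, c => if m + 1 ≤ c then repB (m+1) (c - (m+1)) else (m+2, c)
-- triangular numbers
def tri : Nat → Nat
  | 0 => 0
  | q+1 => (q+1) + tri q

lemma segI_zero (a : Int) : segI a 0 = [] := rfl
lemma segI_succ (a : Int) (t : Nat) : segI a (t+1) = segI a t ++ [a - t] := by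
  simp [segI, List.range_succ]
lemma segI_cons (a : Int) (t : Nat) : segI a (t+1) = a :: segI (a-1) t := by
  unfold segI
  rw [List.range_succ_eq_map, List.map_cons, List.map_map]
  congr 1
  · simp
  · apply List.map_congr_left; intro j _; simp; push_cast; ring
lemma segI_length (a : Int) (t : Nat) : (segI a t).length = t := by simp [segI]
lemma ascI_cons (a : Int) (c : Nat) : ascI a (c+1) = a :: ascI (a+1) c := by
  unfold ascI
  rw [List.range_succ_eq_map, List.map_cons, List.map_map]
  congr 1
  · simp
  · apply List.map_congr_left; intro j _; simp; push_cast; ring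

lemma tri_cast_two (q : Nat) : (tri q : Int) * 2 = (q : Int) * ((q : Int) + 1) := by
  induction q with
  | zero => simp [tri]
  | succ q ih => simp only [tri]; push_cast; linear_combination ih

lemma set_swap (A B : List Int) (y c x1 x2 : Int) :
    ((A ++ y :: c :: B).set A.length x1).set (A.length + 1) x2 = A ++ x1 :: x2 :: B := by
  induction A with
  | nil => simp
  | cons h tA ih => simp [List.set]

lemma getD_at_len (A B : List Int) (y : Int) :
    PySem.List.pyGetD (A ++ y :: B) ((A.length : Int)) 0 = y := by
  simp [PySem.List.pyGetD_natCast, List.getD_eq_getElem?_getD]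

lemma getD_at_len1 (A B : List Int) (y c : Int) :
    PySem.List.pyGetD (A ++ y :: c :: B) ((A.length : Int) + 1) 0 = c := by
  have : ((A.length : Int) + 1) = ((A.length + 1 : Nat) : Int) := by push_cast; ring
  rw [this, PySem.List.pyGetD_natCast]
  simp [List.getD_eq_getElem?_getD]

lemma tri_split (q : Nat) (h : 1 ≤ q) : tri q = q + tri (q - 1) := by
  obtain ⟨q', rfl⟩ : ∃ q', q = q' + 1 := ⟨q - 1, by omega⟩
  simp [tri]

-- boundary identity: end of a pass = start of the next
lemma SL_boundary (N m : Nat) (h1 : 2 ≤ m) (h2 : m ≤ N) :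
    SL N m (m-1) = SL N (m-1) 0 := by
  obtain ⟨q, rfl⟩ : ∃ q, m = q + 2 := ⟨m - 2, by omega⟩
  unfold SL
  have e1 : q + 2 - 1 - (q + 2 - 1) = 0 := by omega
  have e2 : q + 2 - 1 = q + 1 := by omega
  have e3 : N - (q + 1) = (N - (q + 2)) + 1 := by omega
  have e4 : (q + 1 : Nat) - 1 - (0:Nat) = q := by omega
  rw [e1, e2, e3, e4, segI_zero, segI_zero, ascI_cons, segI_cons]
  push_cast
  ring_nf
  simp [List.cons_append]

-- one non-reset swap step, at in-pass offset t with t+1 < m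
lemma SL_swap (N m t : Nat) (h1 : t + 2 ≤ m) (h2 : m ≤ N) :
    (PySem.List.pySetD
      (PySem.List.pySetD (SL N m t) ((t : Int))
        (PySem.List.pyGetD (SL N m t) ((t : Int) + 1) 0))
      ((t : Int) + 1) (PySem.List.pyGetD (SL N m t) ((t : Int)) 0)) = SL N m (t+1) := by
  have hseg : segI ((m:Int) - 1 - t) (m - 1 - t)
      = ((m:Int) - 1 - t) :: segI (((m:Int) - 1 - t) - 1) (m - 1 - (t+1)) := by
    have e : m - 1 - t = (m - 1 - (t+1)) + 1 := by omega
    rw [e, segI_cons]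
  have ht' : ((t : Int)) = ((segI ((m:Int) - 1) t).length : Int) := by rw [segI_length]
  unfold SL
  rw [hseg, List.cons_append, ht', getD_at_len, getD_at_len1, PySem.List.pySetD_natCast]
  have hlc : ((segI ((m:Int) - 1) t).length : Int) + 1
      = (((segI ((m:Int) - 1) t).length + 1 : Nat) : Int) := by push_cast; ring
  rw [hlc, PySem.List.pySetD_natCast, set_swap, segI_succ]
  simp only [segI_length]
  push_cast
  simp only [List.append_assoc, List.cons_append, List.nil_append]
  have r : (m:Int) - 1 - (t:Int) - 1 = (m:Int) - 1 - ((t:Int) + 1) := by ring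
  rw [r]

-- A's loop, run c steps from in-pass state (m, t)
lemma mainLemma (c : Nat) : ∀ (m t N : Nat), 1 ≤ m → m ≤ N → t + 1 ≤ m →
    c + t ≤ (m - 1) + tri (m - 2) →
    createLoopA c (SL N m t) (t : Int) ((t : Int) + 1) (m : Int) =
      SL N (adv m t c).1 (adv m t c).2 := by
  induction c with
  | zero => intro _ _ _ _ _ _ _; rfl
  | succ c ih =>
    intro m t N h1 h2 h3 h4
    by_cases hb : (t : Int) + 1 = (m : Int)
    · have htm : t + 1 = m := by exact_mod_cast hb
      have hm3 : 3 ≤ m := by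
        by_contra hcon
        have hm2 : m - 2 = 0 := by omega
        rw [hm2] at h4; simp [tri] at h4; omega
      simp only [createLoopA, if_pos hb]
      have hb1 : SL N m t = SL N (m-1) 0 := by
        have : t = m - 1 := by omega
        rw [this]; exact SL_boundary N m (by omega) h2
      rw [hb1]
      have hsw := SL_swap N (m-1) 0 (by omega) (by omega)
      have cz : ((0 : Nat) : Int) = (0 : Int) := rfl
      rw [cz] at hsw
      norm_num at hsw ⊢
      have cx : (m : Int) - 1 = ((m - 1 : Nat) : Int) := by push_cast [Nat.cast_sub (by omega : 1 ≤ m)]; ring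
      rw [cx, hsw]
      have hone : ((1 : Nat) : Int) = (1 : Int) := rfl
      have := ih (m-1) 1 N (by omega) (by omega) (by omega)
        (by
          have e : tri (m - 2) = (m - 2) + tri (m - 3) := by
            have := tri_split (m - 2) (by omega)
            simpa using this
          rw [show m - 1 - 1 = m - 2 from by omega, show m - 1 - 2 = m - 3 from by omega]
          omega)
      rw [hone] at this
      norm_num at this
      rw [this]
      have ea : adv m t (c+1) = adv (m-1) 1 c := by
        simp only [adv, if_pos htm]
      rw [ea]
    · have htm : ¬ (t + 1 = m) := by
        intro h; apply hb; rw [← h]; push_cast; ring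
      simp only [createLoopA, if_neg hb]
      have hsw := SL_swap N m t (by omega) h2
      rw [hsw]
      have c1 : (t : Int) + 1 = ((t + 1 : Nat) : Int) := by push_cast; ring
      have c2 : (t : Int) + 1 + 1 = ((t + 1 : Nat) : Int) + 1 := by push_cast; ring
      rw [c1, c2] at *
      have := ih m (t+1) N h1 h2 (by omega) (by omega)
      rw [this]
      have ea : adv m t (c+1) = adv m (t+1) c := by
        simp only [adv, if_neg htm]
      rw [ea]

lemma adv_small (c : Nat) : ∀ m t, t + c + 1 ≤ m → adv m t c = (m, t + c) := by
  induction c with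
  | zero => intro m t _; rfl
  | succ c ih =>
    intro m t h
    have hne : ¬ (t + 1 = m) := by omega
    simp [adv, hne]
    rw [ih m (t+1) (by omega)]
    congr 1; omega

lemma adv_shift (m : Nat) (hm : 3 ≤ m) : ∀ k d, 1 ≤ d → k + 1 ≤ m →
    adv m (m - 1 - k) (k + d) = adv (m-1) 0 d := by
  intro k
  induction k with
  | zero =>
    intro d hd _
    obtain ⟨d', rfl⟩ : ∃ d', d = d' + 1 := ⟨d - 1, by omega⟩
    have h1 : (m - 1 - 0) + 1 = m := by omega
    have h2 : ¬ ((0:Nat) + 1 = m - 1) := by omega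
    rw [Nat.zero_add]
    show adv m (m-1-0) (d'+1) = adv (m-1) 0 (d'+1)
    simp only [adv]
    rw [if_pos h1, if_neg h2]
  | succ k ih =>
    intro d hd hk
    have hne : ¬ ((m - 1 - (k+1)) + 1 = m) := by omega
    have e0 : k + 1 + d = (k + d) + 1 := by omega
    rw [e0]
    show adv m (m-1-(k+1)) ((k+d)+1) = adv (m-1) 0 d
    simp only [adv]
    rw [if_neg hne]
    have he : m - 1 - (k+1) + 1 = m - 1 - k := by omega
    rw [he]
    exact ih d hd (by omega)

lemma repB_zero (m : Nat) : repB m 0 = (m, 0) := by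
  match m with
  | 0 => rfl
  | 1 => rfl
  | m+2 => simp [repB]

lemma repB_fst_le (m : Nat) : ∀ c, (repB m c).1 ≤ m := by
  induction m using Nat.strong_induction_on with
  | _ m ih =>
    intro c
    match m with
    | 0 => simp [repB]
    | 1 => simp [repB]
    | m+2 =>
      simp only [repB]
      split
      · exact le_trans (ih (m+1) (by omega) _) (by omega)
      · simp

lemma repB_bounds (m : Nat) : ∀ c, 1 ≤ m → c ≤ tri (m-1) →
    1 ≤ (repB m c).1 ∧ (repB m c).1 ≤ m ∧ (repB m c).2 + 1 ≤ (repB m c).1 := by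
  induction m using Nat.strong_induction_on with
  | _ m ih =>
    intro c h1 h2
    match m, h1 with
    | 1, _ =>
      simp [tri] at h2
      simp [repB, h2]
    | m+2, _ =>
      rw [show m + 2 - 1 = m + 1 from by omega] at h2
      have hts := tri_split (m+1) (by omega)
      rw [show m + 1 - 1 = m from by omega] at hts
      simp only [repB]
      split
      · have hc : c - (m+1) ≤ tri m := by omega
        have := ih (m+1) (by omega) (c - (m+1)) (by omega) (by simpa using hc)
        omega
      · rename_i hnot
        show 1 ≤ m + 2 ∧ m + 2 ≤ m + 2 ∧ c + 1 ≤ m + 2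
        omega

-- bridge: A's position bookkeeping lands on the same list as B's decomposition
lemma bridge (m : Nat) : ∀ c N, 1 ≤ m → m ≤ N → c ≤ tri (m-1) →
    SL N (adv m 0 c).1 (adv m 0 c).2 = SL N (repB m c).1 (repB m c).2 := by
  induction m using Nat.strong_induction_on with
  | _ m ih =>
    intro c N h1 h2 h3
    by_cases hgo : 2 ≤ m ∧ m - 1 ≤ c
    · obtain ⟨hm2, hc⟩ := hgo
      have hrep : repB m c = repB (m-1) (c - (m-1)) := by
        obtain ⟨q, rfl⟩ : ∃ q, m = q + 2 := ⟨m - 2, by omega⟩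
        simp only [repB]
        rw [if_pos (by omega : q + 1 ≤ c)]
        congr 1 <;> omega
      by_cases hcm : c = m - 1
      · subst hcm
        rw [adv_small (m-1) m 0 (by omega), hrep]
        simp only [Nat.sub_self, repB_zero]
        simp only [Nat.zero_add]
        exact SL_boundary N m hm2 h2
      · -- c ≥ m
        have hcge : m ≤ c := by omega
        have hm3 : 3 ≤ m := by
          by_contra hcon
          have : m = 2 := by omega
          subst this
          simp [tri] at h3
          omega
        have hsh := adv_shift m hm3 (m-1) (c - (m-1)) (by omega) (by omega)
        have e : (m - 1) + (c - (m-1)) = c := by omega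
        rw [e] at hsh
        have e2 : m - 1 - (m-1) = 0 := by omega
        rw [e2] at hsh
        rw [hsh, hrep]
        exact ih (m-1) (by omega) (c - (m-1)) N (by omega) (by omega)
          (by
            have hts := tri_split (m-1) (by omega)
            rw [show m - 1 - 1 = m - 2 from by omega] at hts ⊢
            omega)
    · have hstop : repB m c = (m, c) := by
        match m, h1 with
        | 1, _ => rfl
        | m+2, _ =>
          simp only [repB]
          rw [if_neg (by omega)]
      have hcsm : c + 1 ≤ m := by
        rcases Nat.lt_or_ge m 2 with h | h
        · have : m = 1 := by omega
          subst this
          simp [tri] at h3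
          omega
        · omega
      rw [adv_small c m 0 (by omega), hstop]
      simp

-- B's loop computes repB
lemma findB_eq (r : Int) (fuel : Nat) : ∀ (p s : Int), s ≤ r →
    createFindB r fuel p s =
      (p + ((fuel + 1 - (repB (fuel+1) (r - s).toNat).1 : Nat) : Int),
       r - ((repB (fuel+1) (r - s).toNat).2 : Int)) := by
  induction fuel with
  | zero =>
    intro p s hs
    simp only [createFindB, repB]
    simp only [Prod.mk.injEq]
    constructor <;> omega
  | succ fuel ih =>
    intro p s hs
    simp only [createFindB]
    by_cases hcond : s + ((fuel : Int) + 1) ≤ r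
    · rw [if_pos hcond]
      rw [ih (p+1) (s + ((fuel:Int)+1)) hcond]
      have hle : fuel + 1 ≤ (r - s).toNat := by omega
      have hrec : repB (fuel+1+1) (r - s).toNat = repB (fuel+1) ((r-s).toNat - (fuel+1)) := by
        simp only [repB]
        rw [if_pos hle]
      have harg : (r - (s + ((fuel:Int)+1))).toNat = (r - s).toNat - (fuel+1) := by omega
      rw [harg, hrec]
      have hfst := repB_fst_le (fuel+1) ((r-s).toNat - (fuel+1))
      simp only [Prod.mk.injEq]
      exact ⟨by omega, trivial⟩
    · rw [if_neg hcond]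
      have hstop : repB (fuel+1+1) (r - s).toNat = (fuel+2, (r-s).toNat) := by
        simp only [repB]
        rw [if_neg (by omega)]
      rw [hstop]
      simp
      omega

-- ===== VERDICT (by name: the statement is the Claim_ definition above) =====
lemma floordiv_tri (N : Nat) :
    PySem.Int.floordiv ((N:Int)*((N:Int)-1)) 2 = (tri (N-1) : Int) := by
  rw [PySem.Int.floordiv_eq_ediv_of_pos (by norm_num)]
  have h2 : (tri (N-1) : Int) * 2 = (N:Int)*((N:Int)-1) := by
    by_cases hN : N = 0
    · subst hN; simp [tri]
    · have hc := tri_cast_two (N-1)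
      have hcc : ((N-1 : Nat) : Int) = (N:Int) - 1 := by omega
      rw [hcc] at hc
      rw [hc]; ring
  rw [← h2]
  exact Int.mul_ediv_cancel _ (by norm_num)

lemma tri_head (N : Nat) (h : 1 ≤ N) : tri (N-1) = (N-1) + tri (N-2) := by
  rcases Nat.lt_or_ge N 2 with h2 | h2
  · have : N = 1 := by omega
    subst this; simp [tri]
  · have := tri_split (N-1) (by omega)
    rw [show N - 1 - 1 = N - 2 from by omega] at this
    exact this

lemma init_SL (N : Nat) (h : 1 ≤ N) :
    PySem.List.pyRange (N:Int) 0 (-1) = SL N N 0 := by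
  obtain ⟨q, rfl⟩ : ∃ q, N = q + 1 := ⟨N - 1, by omega⟩
  rw [PySem.List.pyRange_neg_one]
  unfold SL
  rw [segI_zero, Nat.sub_self]
  simp only [List.nil_append]
  have e1 : ((((q+1 : Nat):Int)) - 0).toNat = q + 1 := by omega
  rw [e1]
  have hq : (List.range (q+1)).map (fun j : Nat => ((q+1 : Nat):Int) - (j:Int))
      = segI ((q+1 : Nat):Int) (q+1) := rfl
  rw [hq, segI_cons]
  rw [show ((q+1 : Nat):Int) - 1 - ((0:Nat):Int) = ((q+1 : Nat):Int) - 1 from by push_cast; ring]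
  rw [show q + 1 - 1 - 0 = q from by omega]
  simp [ascI]

theorem create_spec : Claim_equal_create := by
  intro n k _hdom hpre
  obtain ⟨hn0, _hnB, hk0⟩ := hpre
  obtain ⟨N, rfl⟩ : ∃ N : Nat, n = (N : Int) := ⟨n.toNat, by omega⟩
  unfold Spec_create
  simp only [create, create_alt, floordiv_tri]
  by_cases hN0 : (N:Int) ≤ 0
  · have hz : N = 0 := by exact_mod_cast le_antisymm hN0 (by exact_mod_cast hn0)
    subst hz
    rw [if_pos hN0]
    rw [show ((tri (0-1) : Nat) : Int) - k = -k from by simp [tri]]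
    rw [show (-k).toNat = 0 from by omega]
    rw [show ((0:Nat):Int) + 1 = 1 from by norm_num]
    rw [PySem.List.pyRange_one_eq_nil le_rfl]
    rfl
  · have hN1 : 1 ≤ N := by omega
    rw [if_neg hN0]
    have hrev : (PySem.List.pyRange 1 ((N:Int)+1) 1).reverse = PySem.List.pyRange (N:Int) 0 (-1) := by
      rw [PySem.List.pyRange_neg_one_eq_reverse]
      norm_num
    by_cases hr : ((tri (N-1) : Nat) : Int) - k ≤ 0
    · rw [if_pos hr]
      rw [show (((tri (N-1) : Nat) : Int) - k).toNat = 0 from by omega]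
      rw [hrev]
      rfl
    · rw [if_neg hr]
      set c := (((tri (N-1) : Nat) : Int) - k).toNat with hc
      have hcap : c ≤ tri (N-1) := by omega
      -- A side
      rw [hrev]
      have hlen : (PySem.List.pyRange (N:Int) 0 (-1)).length = N := by
        rw [PySem.List.pyRange_neg_one]
        simp
      rw [hlen, init_SL N hN1]
      have hA := mainLemma c N 0 N hN1 le_rfl (by omega)
        (by rw [tri_head N hN1] at hcap; omega)
      rw [show ((0:Nat):Int) = (0:Int) from rfl] at hA
      rw [show (0:Int) + 1 = 1 from by norm_num] at hA
      rw [hA]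
      rw [bridge N c N hN1 le_rfl hcap]
      -- B side
      have hB := findB_eq (((tri (N-1) : Nat) : Int) - k) (N-1) 0 0 (by omega)
      rw [show N - 1 + 1 = N from by omega] at hB
      rw [show (((tri (N-1) : Nat) : Int) - k - 0).toNat = c from by omega] at hB
      rw [show ((N:Int) - 1).toNat = N - 1 from by omega, hB]
      obtain ⟨hm1, hmN, ht1⟩ := repB_bounds N c hN1 hcap
      set m' := (repB N c).1 with hm'
      set t' := (repB N c).2 with ht'
      have em : (N:Int) - (0 + ((N - m' : Nat) : Int)) = (m' : Int) := by omega
      have et : ((tri (N-1) : Nat) : Int) - k - (((tri (N-1) : Nat) : Int) - k - (t' : Int)) = (t' : Int) := by ring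
      simp only []
      rw [em, et]
      -- pieces
      rw [PySem.List.pyRange_neg_one, PySem.List.pyRange_neg_one, PySem.List.pyRange_one]
      rw [show (((m':Int) - 1) - ((m':Int) - (t':Int) - 1)).toNat = t' from by omega]
      rw [show ((m':Int) - (t':Int) - 1 - 0).toNat = m' - 1 - t' from by omega]
      rw [show (((N:Int)+1) - ((m':Int)+1)).toNat = N - m' from by omega]
      unfold SL
      have q1 : (List.range t').map (fun j : Nat => ((m':Int) - 1) - (j:Int)) = segI ((m':Int)-1) t' := rfl
      have q2 : (List.range (m'-1-t')).map (fun j : Nat => ((m':Int) - (t':Int) - 1) - (j:Int))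
          = segI ((m':Int)-1-(t':Int)) (m'-1-t') := by
        rw [show ((m':Int) - (t':Int) - 1) = (m':Int) - 1 - (t':Int) from by ring]
        rfl
      have q3 : (List.range (N-m')).map (fun j : Nat => ((m':Int) + 1) + (j:Int)) = ascI ((m':Int)+1) (N-m') := rfl
      rw [q1, q2, q3]
      simp [List.append_assoc]
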